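-- pv_equiv track=rewrite | github.com/Roua-Khalfet/Nexaura | backend/tech-agent/technical_advisor_agent/nodes/project_state_manager.py | _normalize_completed
-- ===== SOURCE A (Python) =====
-- from typing import Any
--
-- PHASE_SEQUENCE = [
--     "discovery",
--     "stack",
--     "architecture",
--     "roadmap",
--     "cost_feasibility",
--     "security",
--     "handoff",
-- ]
--
-- def _normalize_phase(value: Any) -> str:
--     candidate = str(value or "").strip().lower()
--     if candidate in PHASE_SEQUENCE:
--         return candidate
--     return "discovery"
--
-- def _normalize_completed(phases: Any) -> list[str]:
--     if not isinstance(phases, list):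
--         return []
--
--     seen: set[str] = set()
--     normalized: list[str] = []
--     for item in phases:
--         phase = _normalize_phase(item)
--         if phase in seen:
--             continue
--         seen.add(phase)
--         normalized.append(phase)
--
--     return sorted(normalized, key=lambda item: PHASE_SEQUENCE.index(item))
-- ===== SOURCE B (Python) =====
-- from typing import Any
--
-- PHASE_SEQUENCE = [
--     "discovery",
--     "stack",
--     "architecture",
--     "roadmap",
--     "cost_feasibility",
--     "security",
--     "handoff",
-- ]
--
-- def _normalize_phase(value: Any) -> str:
--     candidate = str(value or "").strip().lower()
--     if candidate in PHASE_SEQUENCE: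
--         return candidate
--     return "discovery"
--
-- def _normalize_completed(phases: Any) -> list[str]:
--     if not isinstance(phases, list):
--         return []
--     present = {_normalize_phase(item) for item in phases}
--     return [p for p in PHASE_SEQUENCE if p in present]
-- ===== Notes on version B (the rewrite author's own statement) =====
-- stated objective: idiomatic
-- what changed: Replaces the dedup-list-with-seen-set plus sort-by-PHASE_SEQUENCE-index with a set of normalized phases and a single membership-filtering scan over the fixed PHASE_SEQUENCE.
import Mathlib
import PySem

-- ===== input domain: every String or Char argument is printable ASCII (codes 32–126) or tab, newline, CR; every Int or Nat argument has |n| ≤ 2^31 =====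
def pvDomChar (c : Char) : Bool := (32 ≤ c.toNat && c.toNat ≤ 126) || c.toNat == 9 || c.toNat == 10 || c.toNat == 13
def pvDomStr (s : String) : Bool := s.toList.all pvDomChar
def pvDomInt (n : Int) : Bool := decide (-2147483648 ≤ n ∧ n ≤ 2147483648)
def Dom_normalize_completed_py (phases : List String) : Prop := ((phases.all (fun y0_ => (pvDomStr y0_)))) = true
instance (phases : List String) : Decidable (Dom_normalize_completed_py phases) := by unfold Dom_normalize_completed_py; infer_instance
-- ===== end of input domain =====

-- B replaces A's seen-set/dedup-list/sort-by-index pipeline with one membership filter over the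
-- fixed PHASE_SEQUENCE (objective: idiomatic). Equivalence of the RETURN value is proved for all inputs.

-- ===== PORT A =====
-- module constant PHASE_SEQUENCE (shared by both Pythons)
def phaseSequence : List String :=
  ["discovery", "stack", "architecture", "roadmap", "cost_feasibility", "security", "handoff"]

-- module helper _normalize_phase (shared by both Pythons); for a string value,
-- str(value or "") is value itself ("" stays ""), so candidate = value.strip().lower()
def normalizePhase (value : String) : String :=
  let candidate := PySem.Str.lower (PySem.Str.strip value)
  if phaseSequence.contains candidate then candidate else "discovery"

-- _normalize_completed: the isinstance(phases, list) guard is always true at type List String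
def normalize_completed_py (phases : List String) : List String :=
  let st := phases.foldl
    (fun (st : PySem.Set String × List String) item =>
      let phase := normalizePhase item
      if PySem.Set.contains st.1 phase then st
      else (PySem.Set.add st.1 phase, st.2 ++ [phase]))
    (PySem.Set.empty, [])
  -- key = PHASE_SEQUENCE.index(item); every element of st.2 is in phaseSequence, so the
  -- .getD 0 default for index? = none (where Python would raise ValueError) is never reached
  PySem.List.sorted st.2 (fun s => ((PySem.List.index? phaseSequence s).getD 0 : Int)) false

-- ===== PORT B =====
def normalize_completed_py_alt (phases : List String) : List String :=
  let present : PySem.Set String := PySem.Set.ofList (phases.map normalizePhase)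
  phaseSequence.filter (fun p => PySem.Set.contains present p)

-- ===== PRECONDITION & SPEC =====
def Spec_normalize_completed_py (phases : List String) (out : List String) : Prop := out = normalize_completed_py_alt phases
instance (phases : List String) (out : List String) : Decidable (Spec_normalize_completed_py phases out) := by unfold Spec_normalize_completed_py; infer_instance

-- ===== CLAIM (what is proved, stated in full; the proofs are below) =====
def Claim_equal_normalize_completed_py : Prop := ∀ (phases : List String), Dom_normalize_completed_py phases → Spec_normalize_completed_py phases (normalize_completed_py phases)

-- ===== LEMMAS AND PROOFS =====

-- A's loop keeps `seen` and `normalized` element-for-element identical: both accumulators are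
-- the running set of first occurrences, i.e. Set.ofList of the normalized prefix.
theorem foldA_eq_pair (phases : List String) (s : PySem.Set String) :
    phases.foldl
      (fun (st : PySem.Set String × List String) item =>
        let phase := normalizePhase item
        if PySem.Set.contains st.1 phase then st
        else (PySem.Set.add st.1 phase, st.2 ++ [phase]))
      (s, s)
    = ((phases.map normalizePhase).foldl PySem.Set.add s,
       (phases.map normalizePhase).foldl PySem.Set.add s) := by
  induction phases generalizing s with
  | nil => rfl
  | cons x t ih =>
    simp only [List.foldl_cons, List.map_cons]
    by_cases h : normalizePhase x ∈ s
    · simpa [PySem.Set.contains, PySem.Set.add, h] using ih s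
    · simpa [PySem.Set.contains, PySem.Set.add, h] using ih (s ++ [normalizePhase x])

set_option maxHeartbeats 1000000 in
theorem phaseSequence_nodup : phaseSequence.Nodup := by decide

set_option maxHeartbeats 1000000 in
theorem phaseSequence_key_pairwise :
    phaseSequence.Pairwise (fun a b =>
      ((PySem.List.index? phaseSequence a).getD 0 : Int)
      < ((PySem.List.index? phaseSequence b).getD 0 : Int)) := by decide

theorem normalizePhase_mem (v : String) : normalizePhase v ∈ phaseSequence := by
  show (if phaseSequence.contains (PySem.Str.lower (PySem.Str.strip v)) = true
        then PySem.Str.lower (PySem.Str.strip v) else "discovery") ∈ phaseSequence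
  split
  · next h => exact List.contains_iff_mem.mp h
  · next _ => simp [phaseSequence]

-- sorting a nodup sublist (as a set) of phaseSequence by index = filtering phaseSequence by membership
theorem sorted_index_eq_filter (S : List String) (hnd : S.Nodup)
    (hsub : ∀ x ∈ S, x ∈ phaseSequence) :
    PySem.List.sorted S (fun s => ((PySem.List.index? phaseSequence s).getD 0 : Int)) false
      = phaseSequence.filter (fun p => decide (p ∈ S)) := by
  apply PySem.List.sorted_eq_of_perm_of_pairwise_lt
  · rw [List.perm_ext_iff_of_nodup (List.Nodup.filter _ phaseSequence_nodup) hnd]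
    intro a
    simp only [List.mem_filter, decide_eq_true_eq]
    exact ⟨fun h => h.2, fun h => ⟨hsub a h, h⟩⟩
  · exact List.Pairwise.filter _ phaseSequence_key_pairwise

-- ===== VERDICT (by name: the statement is the Claim_ definition above) =====
theorem normalize_completed_py_spec : Claim_equal_normalize_completed_py := by
  intro phases _
  unfold Spec_normalize_completed_py normalize_completed_py normalize_completed_py_alt
  have h0 : (PySem.Set.empty : PySem.Set String) = ([] : List String) := rfl
  rw [show ((PySem.Set.empty : PySem.Set String), ([] : List String))
        = (([] : List String), ([] : List String)) from rfl]
  rw [foldA_eq_pair phases []]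
  set S := (phases.map normalizePhase).foldl PySem.Set.add [] with hS
  have hSof : S = PySem.Set.ofList (phases.map normalizePhase) := by
    rw [hS, PySem.Set.ofList_eq_foldl]
  have hnd : S.Nodup := by
    rw [hSof]; exact PySem.Set.nodup_ofList _
  have hsub : ∀ x ∈ S, x ∈ phaseSequence := by
    intro x hx
    rw [hSof, PySem.Set.mem_ofList] at hx
    obtain ⟨v, _, hv⟩ := List.mem_map.mp hx
    exact hv ▸ normalizePhase_mem v
  rw [sorted_index_eq_filter S hnd hsub]
  apply List.filter_congr
  intro p _
  rw [hSof]
  simp [PySem.Set.contains]
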